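-- pv_equiv track=rewrite | github.com/bhaktipatil23/OCR-Business-Card | recircle-cardscan-backend/app/core/processor.py | _combine_multi_page_data
-- ===== SOURCE A (Python) =====
-- from typing import List, Dict
--
-- def _combine_multi_page_data(all_data: List[Dict]) -> List[Dict]:
--     """Combine data from multiple pages into complete records"""
--     if not all_data:
--         return []
--
--     if len(all_data) == 1:
--         return all_data
--
--     pass
--
--     merged_record = {
--         "name": "N/A",
--         "phone": "N/A",
--         "email": "N/A",
--         "company": "N/A",
--         "designation": "N/A",
--         "address": "N/A"
--     }
--
--     all_phones = []
--     all_emails = []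
--     all_companies = []
--
--     for record in all_data:
--         if merged_record["name"] == "N/A" and record.get("name", "N/A") != "N/A":
--             merged_record["name"] = record["name"]
--
--         if record.get("phone", "N/A") != "N/A":
--             phones = [p.strip() for p in record["phone"].split(',') if p.strip()]
--             all_phones.extend(phones)
--
--         if record.get("email", "N/A") != "N/A":
--             emails = [e.strip() for e in record["email"].split(',') if e.strip()]
--             all_emails.extend(emails)
--
--         if record.get("company", "N/A") != "N/A":
--             all_companies.append(record["company"])
--
--         if merged_record["designation"] == "N/A" and record.get("designation", "N/A") != "N/A":
--             merged_record["designation"] = record["designation"]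
--
--         if merged_record["address"] == "N/A" and record.get("address", "N/A") != "N/A":
--             merged_record["address"] = record["address"]
--
--     if all_phones:
--         merged_record["phone"] = ','.join(list(dict.fromkeys(all_phones)))
--
--     if all_emails:
--         merged_record["email"] = ','.join(list(dict.fromkeys(all_emails)))
--
--     if all_companies:
--         merged_record["company"] = max(all_companies, key=len)
--
--     return [merged_record]
-- ===== SOURCE B (Python) =====
-- from typing import List, Dict
--
-- def _combine_multi_page_data(all_data: List[Dict]) -> List[Dict]:
--     """Combine data from multiple pages into complete records"""
--     if not all_data:
--         return []
--     if len(all_data) == 1: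
--         return all_data
--
--     def first(field):
--         return next((r[field] for r in all_data if r.get(field, "N/A") != "N/A"), "N/A")
--
--     def joined(field):
--         items = [p.strip() for r in all_data if r.get(field, "N/A") != "N/A"
--                  for p in r[field].split(',') if p.strip()]
--         return ','.join(dict.fromkeys(items)) if items else "N/A"
--
--     companies = [r["company"] for r in all_data if r.get("company", "N/A") != "N/A"]
--
--     return [{
--         "name": first("name"),
--         "phone": joined("phone"),
--         "email": joined("email"),
--         "company": max(companies, key=len) if companies else "N/A",
--         "designation": first("designation"),
--         "address": first("address"),
--     }]
-- ===== Notes on version B (the rewrite author's own statement) =====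
-- stated objective: simpler
-- what changed: Replaces the single interleaved loop with six accumulators by independent per-field passes (first non-N/A via next, flatten+dedup comprehension for phone/email, one filtered list + max-by-len for company), assembling the merged dict directly.
import Mathlib
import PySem

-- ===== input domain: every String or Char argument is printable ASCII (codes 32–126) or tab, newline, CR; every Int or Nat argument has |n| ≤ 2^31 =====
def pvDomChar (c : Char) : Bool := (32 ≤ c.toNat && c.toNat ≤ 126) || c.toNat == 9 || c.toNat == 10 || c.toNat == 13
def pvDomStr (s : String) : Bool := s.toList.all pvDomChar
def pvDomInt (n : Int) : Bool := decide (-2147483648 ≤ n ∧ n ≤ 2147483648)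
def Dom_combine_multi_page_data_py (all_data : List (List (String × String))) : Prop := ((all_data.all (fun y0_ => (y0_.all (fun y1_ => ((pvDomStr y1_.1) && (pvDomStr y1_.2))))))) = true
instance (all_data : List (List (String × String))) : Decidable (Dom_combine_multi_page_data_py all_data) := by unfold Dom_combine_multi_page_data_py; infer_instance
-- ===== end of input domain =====

-- B builds the merged record field-by-field in independent passes instead of A's one interleaved loop; objective: simpler.

-- record.get(k, "N/A") / record[k] on an association list (first match, as the type convention fixes)
def recGetD (r : List (String × String)) (k : String) : String :=
  match r.find? (fun p => p.1 == k) with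
  | some p => p.2
  | none => "N/A"

-- [p.strip() for p in s.split(',') if p.strip()]
def splitParts (s : String) : List String :=
  (((PySem.Str.split? s ",").getD []).map PySem.Str.strip).filter (fun p => p ≠ "")

-- ===== PORT A =====
-- loop state: (name, designation, address, all_phones, all_emails, all_companies);
-- merged_record's phone/email/company stay "N/A" during the loop and are set after it, as in A.
def stepA (s : String × String × String × List String × List String × List String)
    (record : List (String × String)) :
    String × String × String × List String × List String × List String :=
  let n := if s.1 = "N/A" ∧ recGetD record "name" ≠ "N/A" then recGetD record "name" else s.1
  let ps := if recGetD record "phone" ≠ "N/A" then s.2.2.2.1 ++ splitParts (recGetD record "phone") else s.2.2.2.1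
  let es := if recGetD record "email" ≠ "N/A" then s.2.2.2.2.1 ++ splitParts (recGetD record "email") else s.2.2.2.2.1
  let cs := if recGetD record "company" ≠ "N/A" then s.2.2.2.2.2 ++ [recGetD record "company"] else s.2.2.2.2.2
  let d := if s.2.1 = "N/A" ∧ recGetD record "designation" ≠ "N/A" then recGetD record "designation" else s.2.1
  let a := if s.2.2.1 = "N/A" ∧ recGetD record "address" ≠ "N/A" then recGetD record "address" else s.2.2.1
  (n, d, a, ps, es, cs)

def combine_multi_page_data_py (all_data : List (List (String × String))) : List (List (String × String)) :=
  if all_data = [] then []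
  else if all_data.length = 1 then all_data
  else
    let st := all_data.foldl stepA ("N/A", "N/A", "N/A", [], [], [])
    let phone := if st.2.2.2.1 ≠ [] then PySem.Str.join "," (PySem.List.dedup st.2.2.2.1) else "N/A"
    let email := if st.2.2.2.2.1 ≠ [] then PySem.Str.join "," (PySem.List.dedup st.2.2.2.2.1) else "N/A"
    let company := if st.2.2.2.2.2 ≠ [] then PySem.List.maxD st.2.2.2.2.2 PySem.Str.len "N/A" else "N/A"
    [[("name", st.1), ("phone", phone), ("email", email), ("company", company),
      ("designation", st.2.1), ("address", st.2.2.1)]]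

-- ===== PORT B =====
-- first(field): next((r[field] for r in all_data if r.get(field,"N/A") != "N/A"), "N/A")
def firstField (all_data : List (List (String × String))) (k : String) : String :=
  match all_data.find? (fun r => recGetD r k ≠ "N/A") with
  | some r => recGetD r k
  | none => "N/A"

-- joined(field): flatten comprehension, then ','.join(dict.fromkeys(items)) if items else "N/A"
def joinedField (all_data : List (List (String × String))) (k : String) : String :=
  let items := all_data.flatMap (fun r => if recGetD r k ≠ "N/A" then splitParts (recGetD r k) else [])
  if items = [] then "N/A" else PySem.Str.join "," (PySem.List.dedup items)

def companyField (all_data : List (List (String × String))) : String :=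
  let cs := (all_data.filter (fun r => recGetD r "company" ≠ "N/A")).map (fun r => recGetD r "company")
  if cs = [] then "N/A" else PySem.List.maxD cs PySem.Str.len "N/A"

def combine_multi_page_data_py_alt (all_data : List (List (String × String))) : List (List (String × String)) :=
  match all_data with
  | [] => []
  | [_] => all_data
  | _ =>
    [[("name", firstField all_data "name"),
      ("phone", joinedField all_data "phone"),
      ("email", joinedField all_data "email"),
      ("company", companyField all_data),
      ("designation", firstField all_data "designation"),
      ("address", firstField all_data "address")]]

-- ===== PRECONDITION & SPEC =====
def Spec_combine_multi_page_data_py (all_data : List (List (String × String))) (out : List (List (String × String))) : Prop := out = combine_multi_page_data_py_alt all_data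
instance (all_data : List (List (String × String))) (out : List (List (String × String))) : Decidable (Spec_combine_multi_page_data_py all_data out) := by unfold Spec_combine_multi_page_data_py; infer_instance

-- ===== CLAIM (what is proved, stated in full; the proofs are below) =====
def Claim_equal_combine_multi_page_data_py : Prop := ∀ (all_data : List (List (String × String))), Dom_combine_multi_page_data_py all_data → Spec_combine_multi_page_data_py all_data (combine_multi_page_data_py all_data)

-- ===== LEMMAS AND PROOFS =====

-- 'if l ≠ [] then x else "N/A"' (A's post-loop guards) is 'if l = [] then "N/A" else x' (B's)
theorem if_flip (l : List String) (x : String) :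
    (if l ≠ [] then x else "N/A") = (if l = [] then "N/A" else x) := by
  by_cases h : l = [] <;> simp [h]

-- A's fold splits into six independent per-field folds
theorem foldA_split (l : List (List (String × String)))
    (n d a : String) (ps es cs : List String) :
    l.foldl stepA (n, d, a, ps, es, cs) =
      (l.foldl (fun x r => if x = "N/A" ∧ recGetD r "name" ≠ "N/A" then recGetD r "name" else x) n,
       l.foldl (fun x r => if x = "N/A" ∧ recGetD r "designation" ≠ "N/A" then recGetD r "designation" else x) d,
       l.foldl (fun x r => if x = "N/A" ∧ recGetD r "address" ≠ "N/A" then recGetD r "address" else x) a,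
       l.foldl (fun x r => if recGetD r "phone" ≠ "N/A" then x ++ splitParts (recGetD r "phone") else x) ps,
       l.foldl (fun x r => if recGetD r "email" ≠ "N/A" then x ++ splitParts (recGetD r "email") else x) es,
       l.foldl (fun x r => if recGetD r "company" ≠ "N/A" then x ++ [recGetD r "company"] else x) cs) := by
  induction l generalizing n d a ps es cs with
  | nil => rfl
  | cons h t ih => simp [stepA, ih]

-- the first-non-"N/A" fold is firstField
theorem fold_first (l : List (List (String × String))) (k : String) :
    l.foldl (fun x r => if x = "N/A" ∧ recGetD r k ≠ "N/A" then recGetD r k else x) "N/A" =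
      firstField l k := by
  have gen : ∀ (l : List (List (String × String))) (x : String),
      l.foldl (fun x r => if x = "N/A" ∧ recGetD r k ≠ "N/A" then recGetD r k else x) x =
        if x = "N/A" then firstField l k else x := by
    intro l
    induction l with
    | nil =>
      intro x; simp [firstField]
    | cons h t ih =>
      intro x
      by_cases hx : x = "N/A"
      · subst hx
        by_cases hh : recGetD h k ≠ "N/A"
        · simp [firstField, List.find?, hh, ih, List.foldl_cons]
        · simp only [not_not] at hh
          simp [firstField, List.find?, hh, ih, List.foldl_cons]
      · simp [hx, ih]
  simpa using gen l "N/A"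

-- the extend-if fold is B's flatMap comprehension
theorem fold_extend (l : List (List (String × String))) (k : String) :
    l.foldl (fun x r => if recGetD r k ≠ "N/A" then x ++ splitParts (recGetD r k) else x) [] =
      l.flatMap (fun r => if recGetD r k ≠ "N/A" then splitParts (recGetD r k) else []) := by
  have := PySem.List.foldl_append_eq_flatMap
    (g := fun r => if recGetD r k ≠ "N/A" then splitParts (recGetD r k) else [])
    (l := l) (acc := ([] : List String))
  rw [show (List.foldl (fun x r => if recGetD r k ≠ "N/A" then x ++ splitParts (recGetD r k) else x) [] l)
      = (List.foldl (fun acc x => acc ++ if recGetD x k ≠ "N/A" then splitParts (recGetD x k) else []) [] l) from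
    PySem.List.foldl_congr_mem _ _ _ _ (by intro acc r _; by_cases h : recGetD r k ≠ "N/A" <;> simp [h])]
  simpa using this

-- the append-if fold is B's filter-then-map company list
theorem fold_companies (l : List (List (String × String))) :
    l.foldl (fun x r => if recGetD r "company" ≠ "N/A" then x ++ [recGetD r "company"] else x) [] =
      (l.filter (fun r => recGetD r "company" ≠ "N/A")).map (fun r => recGetD r "company") := by
  simpa using PySem.List.foldl_append_ite
    (p := fun r => recGetD r "company" ≠ "N/A") (f := fun r => recGetD r "company")
    (l := l) (acc := ([] : List String))

-- ===== VERDICT (by name: the statement is the Claim_ definition above) =====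
theorem combine_multi_page_data_py_spec : Claim_equal_combine_multi_page_data_py := by
  intro all_data _
  unfold Spec_combine_multi_page_data_py
  match all_data with
  | [] => rfl
  | [r] => rfl
  | r1 :: r2 :: t =>
    simp only [combine_multi_page_data_py, combine_multi_page_data_py_alt]
    rw [foldA_split]
    simp only [fold_first, fold_extend, fold_companies]
    simp only [joinedField, companyField, if_flip]
    rfl
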